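-- pv_equiv track=rewrite | github.com/Alex-Steel-13/Tic-Tac-Toe | 3D Noughts and Crosses Minimax (bitboards).py | evaluate
-- ===== SOURCE A (Python) =====
-- bitboards = [0,0]
--
-- def get_bit(bitboard, square):
--     #returns the bit if there is one there
--     return bitboard & (1 << square)
--
-- def evaluate(bitboards):
--     # list of all possible wins
--     win_table = [
--     # rows (per board)
--     [0, 1, 2], [3, 4, 5], [6, 7, 8], [9, 10, 11], [12, 13, 14], [15, 16, 17], [18, 19, 20], [21, 22, 23], [24, 25, 26],
--     # columns (per board)
--     [0, 3, 6], [1, 4, 7], [2, 5, 8], [9, 12, 15], [10, 13, 16], [11, 14, 17], [18, 21, 24], [19, 22, 25], [20, 23, 26],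
--     # diagonals (per board)
--     [0, 4, 8], [2, 4, 6], [9, 13, 17], [11, 13, 15], [18, 22, 26], [20, 22, 24],
--     # stacks (between boards)
--     [0, 9, 18], [1, 10, 19], [2, 11, 20], [3, 12, 21], [4, 13, 22], [5, 14, 23], [6, 15, 24], [7, 16, 25], [8, 17, 26],
--     # diagonals (between board)
--     [0, 12, 24], [1, 13, 25], [2, 14, 26], [6, 12, 18], [7, 13, 19], [8, 14, 20], [0, 10, 20], [3, 13, 23], [6, 16, 26],
--     [2, 10, 18], [5, 13, 21], [8, 16, 24], [0, 13, 26], [2, 13, 24], [6, 13, 20], [8, 13, 18]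
--     ]
--     # for loop for the two bitboards
--     for p in range(2):
--         # for loop for every list in the win table
--         for i in range(len(win_table)):
--             counter = 0
--             #iterate through each element of the list
--             for j in range(3):
--                 if get_bit(bitboards[p], win_table[i][j]):
--                     counter+=1
--             # if counter is 3, then someone has won
--             if counter == 3:
--                 if p:
--                     return -10
--                 else:
--                     return 10
-- ===== SOURCE B (Python) =====
-- # Different algorithm: instead of scanning the 49 explicit win lines, B uses the
-- # classic bitboard shift trick: a player has three in a row in direction d iff
-- # occ & (occ >> d) & (occ >> 2*d) has a bit set at a valid start square of that
-- # direction. Only 13 directions (step d = 1..13) need testing, each with one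
-- # shift/AND expression against a precomputed start-square mask.
--
-- FULL = (1 << 27) - 1  # the 27 board squares
--
--
-- def _dirs():
--     # the 13 positive-step directions (dx, dy, dz) of the 3x3x3 cube, each with
--     # the mask of squares from which a full line can start in that direction
--     dirs = []
--     for dz in (0, 1):
--         for dy in (-1, 0, 1):
--             for dx in (-1, 0, 1):
--                 d = dx + 3 * dy + 9 * dz
--                 if d <= 0:
--                     continue
--                 starts = 0
--                 for z in range(3):
--                     for y in range(3):
--                         for x in range(3):
--                             if 0 <= x + 2 * dx <= 2 and 0 <= y + 2 * dy <= 2 and 0 <= z + 2 * dz <= 2: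
--                                 starts |= 1 << (x + 3 * y + 9 * z)
--                 dirs.append((d, starts))
--     return dirs
--
--
-- DIRS = _dirs()
--
--
-- def evaluate(bitboards):
--     for p, score in ((0, 10), (1, -10)):
--         occ = bitboards[p] & FULL
--         for d, starts in DIRS:
--             if occ & (occ >> d) & (occ >> (2 * d)) & starts:
--                 return score
-- ===== Notes on version B (the rewrite author's own statement) =====
-- stated objective: alternative
-- what changed: B abandons the 49-entry win-line table entirely: it detects three-in-a-row with the classic bitboard shift trick, testing for each of the 13 geometric directions d whether occ & (occ>>d) & (occ>>2d) hits a precomputed start-square mask, so no per-line or per-square enumeration remains.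
-- outside the precondition, e.g. on evaluate([7]): A returns 10, B returns 10
import Mathlib
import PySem

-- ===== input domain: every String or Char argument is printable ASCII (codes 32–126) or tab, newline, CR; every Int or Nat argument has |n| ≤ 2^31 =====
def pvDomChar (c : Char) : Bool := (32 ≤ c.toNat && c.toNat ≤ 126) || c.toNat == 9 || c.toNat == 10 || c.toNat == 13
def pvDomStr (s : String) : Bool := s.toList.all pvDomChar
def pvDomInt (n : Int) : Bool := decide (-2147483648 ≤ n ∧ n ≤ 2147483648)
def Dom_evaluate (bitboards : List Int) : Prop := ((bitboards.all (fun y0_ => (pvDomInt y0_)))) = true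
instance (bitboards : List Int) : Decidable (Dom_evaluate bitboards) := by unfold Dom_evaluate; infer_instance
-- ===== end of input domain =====

-- B replaces A's 49-entry win-line table with the bitboard shift trick: for each of the
-- 13 geometric directions d it tests occ & (occ >> d) & (occ >> 2d) against a start-square
-- mask (objective: alternative; same result, no per-line enumeration).

-- ===== PORT A =====
-- the 49 win lines of A's win_table (squares are nonnegative literals 0..26, kept as Nat shift amounts)
def winTable : List (List Nat) := [
  [0, 1, 2], [3, 4, 5], [6, 7, 8], [9, 10, 11], [12, 13, 14], [15, 16, 17], [18, 19, 20], [21, 22, 23], [24, 25, 26],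
  [0, 3, 6], [1, 4, 7], [2, 5, 8], [9, 12, 15], [10, 13, 16], [11, 14, 17], [18, 21, 24], [19, 22, 25], [20, 23, 26],
  [0, 4, 8], [2, 4, 6], [9, 13, 17], [11, 13, 15], [18, 22, 26], [20, 22, 24],
  [0, 9, 18], [1, 10, 19], [2, 11, 20], [3, 12, 21], [4, 13, 22], [5, 14, 23], [6, 15, 24], [7, 16, 25], [8, 17, 26],
  [0, 12, 24], [1, 13, 25], [2, 14, 26], [6, 12, 18], [7, 13, 19], [8, 14, 20], [0, 10, 20], [3, 13, 23], [6, 16, 26],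
  [2, 10, 18], [5, 13, 21], [8, 16, 24], [0, 13, 26], [2, 13, 24], [6, 13, 20], [8, 13, 18]]

-- get_bit(bitboard, square) = bitboard & (1 << square)
def getBit (bitboard : Int) (square : Nat) : Int := PySem.Int.band bitboard ((1:Int) <<< square)

-- inner loops: for each line of win_table, count the player's bits on its 3 squares (for j in range(3));
-- A returns as soon as a line reaches counter == 3, so this reports whether some line does
def linesWin (bb : Int) : List (List Nat) → Bool
  | [] => false
  | line :: rest =>
    let counter : Int := line.foldl (fun c sq => if getBit bb sq ≠ 0 then c + 1 else c) 0
    if counter = 3 then true else linesWin bb rest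

-- outer loop: for p in range(2), with `return -10 if p else 10` on a completed line
def evalLoopA (bitboards : List Int) : List Int → Option Int
  | [] => none
  | p :: rest =>
    if linesWin (PySem.List.pyGetD bitboards p 0) winTable then
      (if p ≠ 0 then some (-10) else some 10)
    else evalLoopA bitboards rest

def evaluate (bitboards : List Int) : Option Int :=
  evalLoopA bitboards (PySem.List.pyRange 0 2 1)

-- ===== PORT B =====
-- FULL = (1 << 27) - 1
def fullMask : Nat := (1 <<< 27) - 1

-- the start-square mask of direction (dx, dy, dz): the inner x/y/z triple loop of _dirs
def startsFor (dx dy dz : Int) : Nat :=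
  ([0, 1, 2] : List Nat).foldl (fun (sz : Nat) (z : Nat) =>
    ([0, 1, 2] : List Nat).foldl (fun (sy : Nat) (y : Nat) =>
      ([0, 1, 2] : List Nat).foldl (fun (sx : Nat) (x : Nat) =>
        if 0 ≤ (x : Int) + 2 * dx ∧ (x : Int) + 2 * dx ≤ 2 ∧
           0 ≤ (y : Int) + 2 * dy ∧ (y : Int) + 2 * dy ≤ 2 ∧
           0 ≤ (z : Int) + 2 * dz ∧ (z : Int) + 2 * dz ≤ 2
        then sx ||| ((1 : Nat) <<< (x + 3 * y + 9 * z)) else sx) sy) sz) (0 : Nat)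

-- DIRS = _dirs(): the 13 positive-step directions with their start masks
def dirsB : List (Nat × Nat) :=
  ([0, 1] : List Int).flatMap fun dz =>
    ([-1, 0, 1] : List Int).flatMap fun dy =>
      ([-1, 0, 1] : List Int).filterMap fun dx =>
        let d := dx + 3 * dy + 9 * dz
        if d ≤ 0 then none else some (d.toNat, startsFor dx dy dz)

-- for p, score in ((0, 10), (1, -10)): occ = bitboards[p] & FULL;
--   for d, starts in DIRS: if occ & (occ >> d) & (occ >> (2*d)) & starts: return score
def evalLoopB (bitboards : List Int) : List (Int × Int) → Option Int
  | [] => none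
  | (p, score) :: rest =>
    let occ := PySem.Int.band (PySem.List.pyGetD bitboards p 0) ((fullMask : Nat) : Int)
    if dirsB.any (fun ds =>
        PySem.Int.band (PySem.Int.band (PySem.Int.band occ (occ >>> ds.1)) (occ >>> (2 * ds.1))) ((ds.2 : Nat) : Int) ≠ 0)
    then some score else evalLoopB bitboards rest

def evaluate_alt (bitboards : List Int) : Option Int :=
  evalLoopB bitboards [(0, 10), (1, -10)]

-- ===== PRECONDITION & SPEC =====
-- Pre_ excludes lists of fewer than 2 bitboards, on which A's bitboards[p] raises IndexError
-- (except the accidental case of a 1-element list whose single board already holds a line, where A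
-- returns 10 before touching index 1 — B indexes the same way and also returns 10 there).
def Pre_evaluate (bitboards : List Int) : Prop := 2 ≤ bitboards.length
instance (bitboards : List Int) : Decidable (Pre_evaluate bitboards) := by unfold Pre_evaluate; infer_instance
def pvWitness_evaluate : List Int := [7, 0]

def Spec_evaluate (bitboards : List Int) (out : Option Int) : Prop := out = evaluate_alt bitboards
instance (bitboards : List Int) (out : Option Int) : Decidable (Spec_evaluate bitboards out) := by unfold Spec_evaluate; infer_instance

-- ===== CLAIM (what is proved, stated in full; the proofs are below) =====
def Claim_equal_evaluate : Prop := ∀ (bitboards : List Int), Dom_evaluate bitboards → Pre_evaluate bitboards → Spec_evaluate bitboards (evaluate bitboards)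

-- ===== LEMMAS AND PROOFS =====

-- subtracting the submask m &&& y from m clears exactly y's bits: it is the bitwise difference
theorem sub_and_eq_ldiff (m : Nat) : ∀ y : Nat, m - (m &&& y) = Nat.ldiff m y := by
  induction m using Nat.binaryRec with
  | zero =>
    intro y
    refine (Nat.zero_and y) ▸ ?_
    apply Nat.eq_of_testBit_eq
    intro k
    simp [Nat.testBit_ldiff]
  | bit b n ih =>
    intro y
    rw [← Nat.bit_testBit_zero_shiftRight_one y, Nat.land_bit, Nat.ldiff_bit]
    have h1 : n &&& (y >>> 1) ≤ n := Nat.and_le_left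
    have h2 := ih (y >>> 1)
    cases b <;> cases hy : y.testBit 0 <;> simp [Nat.bit] <;> omega

-- Python's a & m for natural m, bitwise: band a ↑m is the natural number whose bit k is
-- a's two's-complement bit k AND m's bit k
theorem band_natCast_testBit (a : Int) (m k : Nat) :
    (PySem.Int.band a (m : Int)).toNat.testBit k = (a.testBit k && m.testBit k) := by
  cases a with
  | ofNat n =>
    rw [Int.ofNat_eq_natCast, PySem.Int.band_natCast, Int.toNat_natCast]
    have hn : ((n : Int)).testBit k = n.testBit k := rfl
    rw [hn, Nat.testBit_land]
  | negSucc n =>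
    have h0 : ¬ (0:Int) ≤ Int.negSucc n := not_le.mpr (Int.negSucc_lt_zero n)
    have hm : (0:Int) ≤ (m : Int) := Int.natCast_nonneg m
    have hy : (-(Int.negSucc n) - 1).toNat = n := by rw [Int.negSucc_eq]; omega
    simp only [PySem.Int.band, if_neg h0, if_pos hm, hy, Int.toNat_natCast]
    rw [sub_and_eq_ldiff]
    have hns : (Int.negSucc n).testBit k = !(n.testBit k) := rfl
    simp [Nat.testBit_ldiff, hns, Bool.and_comm]

theorem band_natCast_nonneg (a : Int) (m : Nat) : 0 ≤ PySem.Int.band a (m : Int) :=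
  PySem.Int.band_comm a (m : Int) ▸ PySem.Int.band_nonneg_of_nonneg_left a (Int.ofNat_nonneg m)

-- a natural number is nonzero iff some bit of it is set
theorem nat_ne_zero_iff_testBit (n : Nat) : n ≠ 0 ↔ ∃ k, n.testBit k = true := by
  constructor
  · intro h
    by_contra hc
    push_neg at hc
    exact h (Nat.eq_of_testBit_eq fun k =>
      (Bool.eq_false_iff.mpr (hc k)).trans (Nat.zero_testBit k).symm)
  · rintro ⟨k, hk⟩ rfl
    simp [Nat.zero_testBit] at hk

-- A's truthiness test `if get_bit(bb, sq):` is exactly "bit sq of bb is set"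
theorem getBit_iff (bb : Int) (sq : Nat) : getBit bb sq ≠ 0 ↔ bb.testBit sq = true := by
  have hsh : (1:Int) <<< sq = ((1 <<< sq : Nat) : Int) := rfl
  have h1 : (1 <<< sq : Nat) = 2 ^ sq := by simp [Nat.shiftLeft_eq]
  unfold getBit
  rw [hsh, h1]
  have hnn := band_natCast_nonneg bb (2 ^ sq)
  rw [← Int.toNat_of_nonneg hnn]
  have : ((PySem.Int.band bb ((2 ^ sq : Nat) : Int)).toNat : Int) ≠ 0 ↔
      (PySem.Int.band bb ((2 ^ sq : Nat) : Int)).toNat ≠ 0 := by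
    exact_mod_cast Iff.rfl
  rw [this, nat_ne_zero_iff_testBit]
  constructor
  · rintro ⟨k, hk⟩
    rw [band_natCast_testBit, Nat.testBit_two_pow] at hk
    simp only [Bool.and_eq_true, decide_eq_true_eq] at hk
    exact hk.2 ▸ hk.1
  · intro h
    refine ⟨sq, ?_⟩
    rw [band_natCast_testBit]
    simp [Nat.testBit_two_pow, h]

-- A's counter over one 3-square line reaches 3 exactly when all three bits are set
theorem counter_eq (bb : Int) (x y z : Nat) :
    (([x, y, z].foldl (fun c sq => if getBit bb sq ≠ 0 then c + 1 else c) (0:Int)) = 3)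
      ↔ (bb.testBit x = true ∧ bb.testBit y = true ∧ bb.testBit z = true) := by
  simp only [List.foldl_cons, List.foldl_nil]
  rw [← getBit_iff, ← getBit_iff, ← getBit_iff]
  split_ifs with h1 h2 h3 <;> constructor <;> intro hc <;>
    first
      | exact ⟨h1, h2, h3⟩
      | exact absurd hc.1 h1
      | exact absurd hc.2.1 h2
      | exact absurd hc.2.2 h3
      | omega

-- A's scan of the win table is "some line has all its squares set"
theorem linesWin_eq (bb : Int) (lines : List (List Nat))
    (h : ∀ l ∈ lines, l.length = 3) :
    linesWin bb lines = lines.any (fun l => l.all (fun sq => bb.testBit sq)) := by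
  induction lines with
  | nil => rfl
  | cons line rest ih =>
    obtain ⟨x, y, z, rfl⟩ := List.length_eq_three.mp (h line (List.mem_cons_self ..))
    simp only [linesWin, List.any_cons]
    by_cases hc : (([x, y, z].foldl (fun c sq => if getBit bb sq ≠ 0 then c + 1 else c) (0:Int)) = 3)
    · obtain ⟨hx, hy, hz⟩ := (counter_eq bb x y z).mp hc
      rw [if_pos hc]
      simp [hx, hy, hz]
    · rw [if_neg hc, ih (fun l hl => h l (List.mem_cons_of_mem _ hl))]
      have : ([x, y, z].all (fun sq => bb.testBit sq)) = false := by
        rw [counter_eq] at hc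
        cases hx : bb.testBit x <;> cases hy : bb.testBit y <;> cases hz : bb.testBit z <;>
          simp_all
      rw [this, Bool.false_or]

-- "player with board bb has a completed line", in A's terms
def winAll (bb : Int) : Bool := winTable.any (fun l => l.all (fun sq => bb.testBit sq))

-- bits of B's masked occupancy occ = bb & FULL
theorem occ_testBit (bb : Int) (k : Nat) :
    (PySem.Int.band bb ((fullMask : Nat) : Int)).toNat.testBit k
      = (decide (k < 27) && bb.testBit k) := by
  have hf : fullMask = 2 ^ 27 - 1 := by decide
  rw [band_natCast_testBit, hf, Nat.testBit_two_pow_sub_one, Bool.and_comm]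

-- three checkable geometric facts linking the 13 directions to the 49 lines
theorem factF : (dirsB.all fun ds => (List.range 27).all fun t =>
    !ds.2.testBit t || winTable.contains [t, t + ds.1, t + 2 * ds.1]) = true := by decide

theorem factG : (winTable.all fun l => dirsB.any fun ds => (List.range 27).any fun t =>
    decide (l = [t, t + ds.1, t + 2 * ds.1]) && ds.2.testBit t) = true := by decide

theorem factS : (dirsB.all fun ds => decide (ds.2 < 2 ^ 27)) = true := by decide

-- B's shift test for one direction, characterised bit by bit
theorem dirHit_iff (bb : Int) (d s : Nat) :
    (PySem.Int.band (PySem.Int.band (PySem.Int.band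
        (PySem.Int.band bb ((fullMask : Nat) : Int))
        ((PySem.Int.band bb ((fullMask : Nat) : Int)) >>> d))
        ((PySem.Int.band bb ((fullMask : Nat) : Int)) >>> (2 * d))) ((s : Nat) : Int) ≠ 0)
      ↔ ∃ t, ((PySem.Int.band bb ((fullMask : Nat) : Int)).toNat.testBit t
              && (PySem.Int.band bb ((fullMask : Nat) : Int)).toNat.testBit (d + t)
              && (PySem.Int.band bb ((fullMask : Nat) : Int)).toNat.testBit (2 * d + t)
              && s.testBit t) = true := by
  set N : Nat := (PySem.Int.band bb ((fullMask : Nat) : Int)).toNat with hN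
  have hocc : PySem.Int.band bb ((fullMask : Nat) : Int) = (N : Int) := by
    rw [hN, Int.toNat_of_nonneg (band_natCast_nonneg bb fullMask)]
  rw [hocc]
  have hs1 : ((N : Int)) >>> d = ((N >>> d : Nat) : Int) := rfl
  have hs2 : ((N : Int)) >>> (2 * d) = ((N >>> (2 * d) : Nat) : Int) := rfl
  rw [hs1, hs2, PySem.Int.band_natCast, PySem.Int.band_natCast, PySem.Int.band_natCast]
  have hne : ((N &&& N >>> d &&& N >>> (2 * d) &&& s : Nat) : Int) ≠ 0 ↔
      (N &&& N >>> d &&& N >>> (2 * d) &&& s : Nat) ≠ 0 := by exact_mod_cast Iff.rfl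
  rw [hne, nat_ne_zero_iff_testBit]
  constructor <;> rintro ⟨t, ht⟩ <;> refine ⟨t, ?_⟩ <;>
    simpa [Nat.testBit_land, Nat.testBit_shiftRight, Bool.and_assoc] using ht

-- the heart of the equivalence: B's 13 shift tests fire exactly when some win line is complete
theorem condB_eq_winAll (bb : Int) :
    (dirsB.any fun ds =>
        PySem.Int.band (PySem.Int.band (PySem.Int.band
          (PySem.Int.band bb ((fullMask : Nat) : Int))
          ((PySem.Int.band bb ((fullMask : Nat) : Int)) >>> ds.1))
          ((PySem.Int.band bb ((fullMask : Nat) : Int)) >>> (2 * ds.1))) ((ds.2 : Nat) : Int) ≠ 0)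
      = winAll bb := by
  rw [Bool.eq_iff_iff]
  simp only [List.any_eq_true, decide_eq_true_eq]
  constructor
  · rintro ⟨ds, hds, hhit⟩
    obtain ⟨t, ht⟩ := (dirHit_iff bb ds.1 ds.2).mp hhit
    simp only [occ_testBit, Bool.and_eq_true, decide_eq_true_eq] at ht
    obtain ⟨⟨⟨⟨ht27, htb⟩, ⟨_, htd⟩⟩, ⟨_, htdd⟩⟩, hst⟩ := ht
    have hmem : [t, t + ds.1, t + 2 * ds.1] ∈ winTable := by
      have := List.all_eq_true.mp factF ds hds
      have h2 := List.all_eq_true.mp this t (List.mem_range.mpr ht27)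
      simp only [Bool.or_eq_true, Bool.not_eq_true'] at h2
      rcases h2 with h2 | h2
      · rw [h2] at hst; exact absurd hst (by simp)
      · exact List.contains_iff_mem.mp h2
    unfold winAll
    rw [List.any_eq_true]
    refine ⟨[t, t + ds.1, t + 2 * ds.1], hmem, ?_⟩
    simp only [List.all_cons, List.all_nil, Bool.and_eq_true]
    refine ⟨htb, ?_, ?_, trivial⟩
    · rw [Nat.add_comm]; exact htd
    · rw [Nat.add_comm]; exact htdd
  · intro hwin
    unfold winAll at hwin
    obtain ⟨l, hl, hall⟩ := List.any_eq_true.mp hwin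
    have hg := List.all_eq_true.mp factG l hl
    obtain ⟨ds, hds, hany⟩ := List.any_eq_true.mp hg
    obtain ⟨t, htr, hconj⟩ := List.any_eq_true.mp hany
    simp only [Bool.and_eq_true, decide_eq_true_eq] at hconj
    obtain ⟨hleq, hst⟩ := hconj
    refine ⟨ds, hds, ?_⟩
    rw [dirHit_iff]
    refine ⟨t, ?_⟩
    subst hleq
    simp only [List.all_cons, List.all_nil, Bool.and_eq_true] at hall
    obtain ⟨h1, h2, h3, _⟩ := hall
    have ht27 : t < 27 := List.mem_range.mp htr
    have hs27 : ds.2 < 2 ^ 27 := by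
      simpa using List.all_eq_true.mp factS ds hds
    have htd27 : t + ds.1 < 27 := by
      by_contra hc
      have : ds.2 ≤ fullMask := by
        have : fullMask = 2 ^ 27 - 1 := by decide
        omega
      -- t + ds.1 ≥ 27 would put the middle square outside the board; rule it out from factF
      have hmem := List.all_eq_true.mp (List.all_eq_true.mp factF ds hds) t (List.mem_range.mpr ht27)
      simp only [Bool.or_eq_true, Bool.not_eq_true'] at hmem
      rcases hmem with hh | hh
      · rw [hh] at hst; exact absurd hst (by simp)
      · have := List.contains_iff_mem.mp hh
        have hlt : ∀ l ∈ winTable, ∀ sq ∈ l, sq < 27 := by decide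
        exact hc (hlt _ this (t + ds.1) (by simp))
    have htdd27 : t + 2 * ds.1 < 27 := by
      have hmem := List.all_eq_true.mp (List.all_eq_true.mp factF ds hds) t (List.mem_range.mpr ht27)
      simp only [Bool.or_eq_true, Bool.not_eq_true'] at hmem
      rcases hmem with hh | hh
      · rw [hh] at hst; exact absurd hst (by simp)
      · have := List.contains_iff_mem.mp hh
        have hlt : ∀ l ∈ winTable, ∀ sq ∈ l, sq < 27 := by decide
        exact hlt _ this (t + 2 * ds.1) (by simp)
    simp only [occ_testBit, Bool.and_eq_true, decide_eq_true_eq]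
    refine ⟨⟨⟨⟨ht27, h1⟩, ?_⟩, ?_⟩, hst⟩
    · rw [Nat.add_comm]; exact ⟨by omega, h2⟩
    · rw [Nat.add_comm]; exact ⟨by omega, h3⟩

theorem winTable_len : ∀ l ∈ winTable, l.length = 3 := by decide

-- ===== VERDICT (by name: the statement is the Claim_ definition above) =====
theorem evaluate_spec : Claim_equal_evaluate := by
  intro bitboards _ hpre
  unfold Pre_evaluate at hpre
  match bitboards, hpre with
  | a :: b :: rest, _ =>
    unfold Spec_evaluate evaluate evaluate_alt
    have hr : PySem.List.pyRange 0 2 1 = [0, 1] := by decide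
    rw [hr]
    simp only [evalLoopA, evalLoopB]
    rw [linesWin_eq _ _ winTable_len, linesWin_eq _ _ winTable_len]
    simp only [PySem.List.pyGetD_zero_cons]
    rw [condB_eq_winAll, condB_eq_winAll]
    simp [winAll]
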